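-- pv_equiv track=rewrite | github.com/savaleyash004/PasswordShield | src/utils/feature_extraction.py | _seqAlphaTransform
-- ===== SOURCE A (Python) =====
-- def _seqAlphaTransform(text: str) -> int:
--     """Calculate the count of sequential alphabetic characters in the input text.
--
--     Args:
--         text (str): Input text.
--
--     Returns:
--         int: Count of sequential alphabetic characters in the input text.
--     """
--     sAlphas = "abcdefghijklmnopqrstuvwxyz"
--     nSeqAlpha = 0
--     for s in range(len(sAlphas) - 2):
--         sFwd = sAlphas[s : s + 3]
--         sRev = sFwd[::-1]
--         if sFwd in text.lower() or sRev in text.lower():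
--             nSeqAlpha += 1
--     return nSeqAlpha
-- ===== SOURCE B (Python) =====
-- def _seqAlphaTransform(text: str) -> int:
--     t = text.lower()
--     seen = set()
--     oa, ox = ord('a'), ord('x')
--     for i in range(len(t) - 2):
--         a, b, c = ord(t[i]), ord(t[i + 1]), ord(t[i + 2])
--         if oa <= a <= ox and b == a + 1 and c == a + 2:
--             seen.add(a - oa)
--         if oa <= c <= ox and b == c + 1 and a == c + 2:
--             seen.add(c - oa)
--     return len(seen)
-- ===== Notes on version B (the rewrite author's own statement) =====
-- stated objective: alternative
-- what changed: Instead of searching the lowered text 24 times for each fixed 3-letter alphabet window and its reverse, B lowers the text once and makes a single pass over it, classifying each 3-character window as an ascending/descending run and collecting the run's alphabet index in a set whose size is returned.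
import Mathlib
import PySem

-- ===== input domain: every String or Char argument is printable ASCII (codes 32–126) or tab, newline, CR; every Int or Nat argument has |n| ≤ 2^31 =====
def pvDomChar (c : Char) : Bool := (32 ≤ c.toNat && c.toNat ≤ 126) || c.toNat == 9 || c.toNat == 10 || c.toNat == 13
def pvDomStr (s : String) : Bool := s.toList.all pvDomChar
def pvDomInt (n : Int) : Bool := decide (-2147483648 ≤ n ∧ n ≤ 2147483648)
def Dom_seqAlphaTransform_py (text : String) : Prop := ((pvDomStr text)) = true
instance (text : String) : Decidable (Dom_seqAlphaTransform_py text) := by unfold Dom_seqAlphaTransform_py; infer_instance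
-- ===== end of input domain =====

-- B replaces A's 24 substring searches over the text by ONE scan of the text that
-- classifies every 3-character window and collects the alphabet indices of the
-- sequential runs it finds in a set (objective: alternative single-pass algorithm).

-- ===== PORT A =====
-- literal port of _seqAlphaTransform: for each of the 24 windows of the alphabet,
-- test 'sFwd in text.lower() or sRev in text.lower()' and count.
def seqAlphaTransform_py (text : String) : Int :=
  let sAlphas : List Char := "abcdefghijklmnopqrstuvwxyz".toList
  (PySem.List.pyRange 0 ((sAlphas.length : Int) - 2) 1).foldl
    (fun nSeqAlpha s =>
      let sFwd := PySem.List.slice sAlphas (some s) (some (s + 3))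
      let sRev := (PySem.List.slice? sFwd none none (-1)).getD []
      if PySem.Chars.isIn sFwd (PySem.Chars.lower text.toList)
          || PySem.Chars.isIn sRev (PySem.Chars.lower text.toList)
      then nSeqAlpha + 1 else nSeqAlpha) 0

-- ===== PORT B =====
-- one loop iteration of Source B: read the codes a,b,c of t[i],t[i+1],t[i+2] and add the
-- alphabet index of an ascending / descending run to the set (97 = ord('a'), 120 = ord('x'))
def altStep (t : List Char) (seen : PySem.Set Int) (i : Int) : PySem.Set Int :=
  let a : Int := ((PySem.List.pyGetD t i 'a').toNat : Int)
  let b : Int := ((PySem.List.pyGetD t (i + 1) 'a').toNat : Int)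
  let c : Int := ((PySem.List.pyGetD t (i + 2) 'a').toNat : Int)
  let seen1 := if 97 ≤ a ∧ a ≤ 120 ∧ b = a + 1 ∧ c = a + 2 then PySem.Set.add seen (a - 97) else seen
  if 97 ≤ c ∧ c ≤ 120 ∧ b = c + 1 ∧ a = c + 2 then PySem.Set.add seen1 (c - 97) else seen1

def seqAlphaTransform_py_alt (text : String) : Int :=
  let t := PySem.Chars.lower text.toList
  let seen := (PySem.List.pyRange 0 ((t.length : Int) - 2) 1).foldl (altStep t) PySem.Set.empty
  PySem.Set.len seen

-- ===== PRECONDITION & SPEC =====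
def Spec_seqAlphaTransform_py (text : String) (out : Int) : Prop := out = seqAlphaTransform_py_alt text
instance (text : String) (out : Int) : Decidable (Spec_seqAlphaTransform_py text out) := by unfold Spec_seqAlphaTransform_py; infer_instance

-- ===== CLAIM (what is proved, stated in full; the proofs are below) =====
def Claim_equal_seqAlphaTransform_py : Prop := ∀ (text : String), Dom_seqAlphaTransform_py text → Spec_seqAlphaTransform_py text (seqAlphaTransform_py text)

-- ===== LEMMAS AND PROOFS =====

-- proof-side names for the alphabet, its characters and the 24 three-letter windows
def pvAlpha : List Char := "abcdefghijklmnopqrstuvwxyz".toList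
def pvCh (s : Nat) : Char := pvAlpha.getD s 'a'
def pvWin (s : Nat) : List Char := [pvCh s, pvCh (s + 1), pvCh (s + 2)]
def pvOcc (t : List Char) (s : Nat) : Bool :=
  PySem.Chars.isIn (pvWin s) t || PySem.Chars.isIn (pvWin s).reverse t

-- what one iteration of B's scan at index i contributes to the set
def pvAdd (t : List Char) (i : Int) (x : Int) : Prop :=
  let a : Int := ((PySem.List.pyGetD t i 'a').toNat : Int)
  let b : Int := ((PySem.List.pyGetD t (i + 1) 'a').toNat : Int)
  let c : Int := ((PySem.List.pyGetD t (i + 2) 'a').toNat : Int)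
  ((97 ≤ a ∧ a ≤ 120 ∧ b = a + 1 ∧ c = a + 2) ∧ x = a - 97) ∨
  ((97 ≤ c ∧ c ≤ 120 ∧ b = c + 1 ∧ a = c + 2) ∧ x = c - 97)

lemma pv_ch_toNat (s : Nat) (h : s < 26) : (pvCh s).toNat = 97 + s := by
  interval_cases s <;> decide

lemma pv_ch_inj (x : Char) (s : Nat) (h : s < 26) : x = pvCh s ↔ x.toNat = 97 + s := by
  constructor
  · rintro rfl; exact pv_ch_toNat s h
  · intro hx
    exact Char.ext (UInt32.toNat_inj.mp (by rw [show x.val.toNat = x.toNat from rfl,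
      show (pvCh s).val.toNat = (pvCh s).toNat from rfl, hx, pv_ch_toNat s h]))

lemma pv_slice_win (s : Nat) (h : s < 24) :
    PySem.List.slice pvAlpha (some ((s : Nat) : Int)) (some (((s : Nat) : Int) + 3)) = pvWin s := by
  have h3 : ((s : Nat) : Int) + 3 = (((s + 3 : Nat)) : Int) := by push_cast; ring
  rw [h3, PySem.List.slice_natCast]
  interval_cases s <;> decide

lemma pv_take3_eq (u : List Char) (a b c : Char) :
    u.take 3 = [a, b, c] ↔ u[0]? = some a ∧ u[1]? = some b ∧ u[2]? = some c := by
  match u with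
  | [] => simp
  | [x] => simp
  | [x, y] => simp
  | x :: y :: z :: r => simp [List.take]

lemma pv_isIn3 (a b c : Char) (t : List Char) :
    PySem.Chars.isIn [a, b, c] t = true ↔
      ∃ j : Nat, t[j]? = some a ∧ t[j + 1]? = some b ∧ t[j + 2]? = some c := by
  rw [← PySem.Chars.exists_prefix_drop_iff_isIn]
  refine exists_congr fun j => ?_
  rw [List.prefix_iff_eq_take]
  have : [a, b, c].length = 3 := rfl
  rw [this, eq_comm, pv_take3_eq]
  simp [List.getElem?_drop]

lemma pv_occ_iff (t : List Char) (s : Nat) :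
    pvOcc t s = true ↔
      ∃ j : Nat,
        (t[j]? = some (pvCh s) ∧ t[j + 1]? = some (pvCh (s + 1)) ∧ t[j + 2]? = some (pvCh (s + 2))) ∨
        (t[j]? = some (pvCh (s + 2)) ∧ t[j + 1]? = some (pvCh (s + 1)) ∧ t[j + 2]? = some (pvCh s)) := by
  unfold pvOcc pvWin
  rw [Bool.or_eq_true, pv_isIn3, show ([pvCh s, pvCh (s + 1), pvCh (s + 2)]).reverse
      = [pvCh (s + 2), pvCh (s + 1), pvCh s] from rfl, pv_isIn3, ← exists_or]

lemma pv_mem_altStep (t : List Char) (s : PySem.Set Int) (i x : Int) :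
    x ∈ altStep t s i ↔ x ∈ s ∨ pvAdd t i x := by
  simp only [altStep, pvAdd]
  split_ifs with h1 h2 h2 <;> (try simp only [PySem.Set.mem_add]) <;> tauto

lemma pv_mem_fold (t : List Char) (L : List Int) (s0 : PySem.Set Int) (x : Int) :
    x ∈ L.foldl (altStep t) s0 ↔ x ∈ s0 ∨ ∃ i ∈ L, pvAdd t i x := by
  induction L generalizing s0 with
  | nil => simp
  | cons i L ih =>
    simp only [List.foldl_cons, ih, pv_mem_altStep, List.mem_cons]
    constructor
    · rintro ((h | h) | ⟨j, hj, h⟩)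
      · exact Or.inl h
      · exact Or.inr ⟨i, Or.inl rfl, h⟩
      · exact Or.inr ⟨j, Or.inr hj, h⟩
    · rintro (h | ⟨j, (rfl | hj), h⟩)
      · exact Or.inl (Or.inl h)
      · exact Or.inl (Or.inr h)
      · exact Or.inr ⟨j, hj, h⟩

lemma pv_nodup_fold (t : List Char) (L : List Int) (s0 : PySem.Set Int) (h : s0.Nodup) :
    (L.foldl (altStep t) s0).Nodup := by
  induction L generalizing s0 with
  | nil => exact h
  | cons i L ih =>
    refine ih _ ?_
    simp only [altStep]
    split_ifs <;> [skip; skip; skip; exact h] <;>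
      first
        | exact PySem.Set.nodup_add _ _ (PySem.Set.nodup_add _ _ h)
        | exact PySem.Set.nodup_add _ _ h

lemma pv_getD_nat (t : List Char) (j : Nat) (h : j < t.length) :
    PySem.List.pyGetD t ((j : Nat) : Int) 'a' = t[j] := by
  rw [PySem.List.pyGetD_eq_getElem t 'a' (by omega) (by exact_mod_cast h)]
  simp

-- the central correspondence: B's scan adds x at some admissible index
-- iff x is the alphabet index s of a window A finds (forward or reversed)
lemma pv_add_iff_occ (t : List Char) (x : Int) :
    (∃ i ∈ PySem.List.pyRange 0 ((t.length : Int) - 2) 1, pvAdd t i x) ↔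
      ∃ s : Nat, s < 24 ∧ pvOcc t s = true ∧ x = (s : Int) := by
  constructor
  · rintro ⟨i, hi, hadd⟩
    rw [PySem.List.mem_pyRange_one] at hi
    obtain ⟨h0, hlt⟩ := hi
    obtain ⟨j, rfl⟩ : ∃ j : Nat, i = ((j : Nat) : Int) := ⟨i.toNat, by omega⟩
    have hjb : j + 2 < t.length := by omega
    have c1 : ((j : Nat) : Int) + 1 = (((j + 1 : Nat)) : Int) := by push_cast; ring
    have c2 : ((j : Nat) : Int) + 2 = (((j + 2 : Nat)) : Int) := by push_cast; ring
    have e0 : PySem.List.pyGetD t ((j : Nat) : Int) 'a' = t[j]'(by omega) :=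
      pv_getD_nat t j (by omega)
    have e1 : PySem.List.pyGetD t (((j : Nat) : Int) + 1) 'a' = t[j + 1]'(by omega) := by
      rw [c1]; exact pv_getD_nat t (j + 1) (by omega)
    have e2 : PySem.List.pyGetD t (((j : Nat) : Int) + 2) 'a' = t[j + 2]'(by omega) := by
      rw [c2]; exact pv_getD_nat t (j + 2) (by omega)
    simp only [pvAdd, e0, e1, e2] at hadd
    rcases hadd with ⟨⟨ha1, ha2, hb, hc⟩, hx⟩ | ⟨⟨hc1, hc2, hb, ha⟩, hx⟩
    · -- ascending run: s = code(t[j]) - 97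
      refine ⟨(t[j]'(by omega)).toNat - 97, by omega, ?_, by omega⟩
      rw [pv_occ_iff]
      refine ⟨j, Or.inl ⟨?_, ?_, ?_⟩⟩ <;>
        rw [List.getElem?_eq_getElem (by omega), Option.some_inj, pv_ch_inj _ _ (by omega)] <;> omega
    · -- descending run: s = code(t[j+2]) - 97
      refine ⟨(t[j + 2]'(by omega)).toNat - 97, by omega, ?_, by omega⟩
      rw [pv_occ_iff]
      refine ⟨j, Or.inr ⟨?_, ?_, ?_⟩⟩ <;>
        rw [List.getElem?_eq_getElem (by omega), Option.some_inj, pv_ch_inj _ _ (by omega)] <;> omega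
  · rintro ⟨s, hs, hocc, rfl⟩
    rw [pv_occ_iff] at hocc
    obtain ⟨j, hcase⟩ := hocc
    have hjb : j + 2 < t.length := by
      rcases hcase with ⟨_, _, h2⟩ | ⟨_, _, h2⟩ <;>
      · have := (List.getElem?_eq_some_iff.mp h2).1
        omega
    refine ⟨((j : Nat) : Int), ?_, ?_⟩
    · rw [PySem.List.mem_pyRange_one]
      constructor
      · omega
      · omega
    · have c1 : ((j : Nat) : Int) + 1 = (((j + 1 : Nat)) : Int) := by push_cast; ring
      have c2 : ((j : Nat) : Int) + 2 = (((j + 2 : Nat)) : Int) := by push_cast; ring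
      have e0 : PySem.List.pyGetD t ((j : Nat) : Int) 'a' = t[j]'(by omega) :=
        pv_getD_nat t j (by omega)
      have e1 : PySem.List.pyGetD t (((j : Nat) : Int) + 1) 'a' = t[j + 1]'(by omega) := by
        rw [c1]; exact pv_getD_nat t (j + 1) (by omega)
      have e2 : PySem.List.pyGetD t (((j : Nat) : Int) + 2) 'a' = t[j + 2]'(by omega) := by
        rw [c2]; exact pv_getD_nat t (j + 2) (by omega)
      simp only [pvAdd, e0, e1, e2]
      rcases hcase with ⟨h0, h1, h2⟩ | ⟨h0, h1, h2⟩
      · rw [List.getElem?_eq_getElem (by omega : j < t.length), Option.some_inj] at h0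
        rw [List.getElem?_eq_getElem (by omega : j + 1 < t.length), Option.some_inj] at h1
        rw [List.getElem?_eq_getElem (by omega : j + 2 < t.length), Option.some_inj] at h2
        rw [pv_ch_inj _ _ (by omega)] at h0
        rw [pv_ch_inj _ _ (by omega)] at h1
        rw [pv_ch_inj _ _ (by omega)] at h2
        exact Or.inl ⟨⟨by omega, by omega, by omega, by omega⟩, by omega⟩
      · rw [List.getElem?_eq_getElem (by omega : j < t.length), Option.some_inj] at h0
        rw [List.getElem?_eq_getElem (by omega : j + 1 < t.length), Option.some_inj] at h1
        rw [List.getElem?_eq_getElem (by omega : j + 2 < t.length), Option.some_inj] at h2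
        rw [pv_ch_inj _ _ (by omega)] at h0
        rw [pv_ch_inj _ _ (by omega)] at h1
        rw [pv_ch_inj _ _ (by omega)] at h2
        exact Or.inr ⟨⟨by omega, by omega, by omega, by omega⟩, by omega⟩

-- A's loop counts exactly the windows s < 24 with pvOcc
lemma pv_A_eq_countP (text : String) :
    seqAlphaTransform_py text
      = ((List.range 24).countP (pvOcc (PySem.Chars.lower text.toList)) : Int) := by
  unfold seqAlphaTransform_py
  dsimp only
  rw [show (("abcdefghijklmnopqrstuvwxyz".toList : List Char).length : Int) - 2 = 24 by decide]
  rw [PySem.List.pyRange_one]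
  simp only [show ((24 : Int) - 0).toNat = 24 by decide, List.foldl_map]
  rw [PySem.List.foldl_congr_mem _ _
      (fun n (s : Nat) => if pvOcc (PySem.Chars.lower text.toList) s then n + 1 else n) 0 ?_]
  · rw [PySem.List.foldl_count_if]; simp
  · intro acc s hs
    have hs24 : s < 24 := List.mem_range.mp hs
    have hsl : PySem.List.slice ("abcdefghijklmnopqrstuvwxyz".toList)
        (some (0 + (s : Int))) (some (0 + (s : Int) + 3)) = pvWin s := by
      simpa using pv_slice_win s hs24
    simp only [hsl, PySem.List.slice?_none_none_neg_one, Option.getD_some]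
    rfl

-- ===== VERDICT (by name: the statement is the Claim_ definition above) =====
theorem seqAlphaTransform_py_spec : Claim_equal_seqAlphaTransform_py := by
  intro text _hdom
  unfold Spec_seqAlphaTransform_py
  set t := PySem.Chars.lower text.toList with ht
  rw [pv_A_eq_countP]
  unfold seqAlphaTransform_py_alt
  rw [← ht]
  set seen := (PySem.List.pyRange 0 ((t.length : Int) - 2) 1).foldl (altStep t) PySem.Set.empty with hseen
  have hnd : seen.Nodup := pv_nodup_fold t _ _ (by simp [PySem.Set.empty])
  have hmem : ∀ x : Int, x ∈ seen
      ↔ x ∈ ((List.range 24).filter (pvOcc t)).map (fun s : Nat => (s : Int)) := by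
    intro x
    rw [hseen, pv_mem_fold, pv_add_iff_occ]
    simp only [PySem.Set.empty, List.not_mem_nil, false_or, List.mem_map, List.mem_filter,
      List.mem_range]
    constructor
    · rintro ⟨s, hs, hocc, rfl⟩; exact ⟨s, ⟨hs, hocc⟩, rfl⟩
    · rintro ⟨s, ⟨hs, hocc⟩, rfl⟩; exact ⟨s, hs, hocc, rfl⟩
  have hnd2 : (((List.range 24).filter (pvOcc t)).map (fun s : Nat => (s : Int))).Nodup :=
    (List.nodup_range.filter _).map (fun a b h => by exact_mod_cast h)
  have hperm : List.Perm seen (((List.range 24).filter (pvOcc t)).map (fun s : Nat => (s : Int))) :=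
    (List.perm_ext_iff_of_nodup hnd hnd2).mpr hmem
  have hlen := hperm.length_eq
  have : PySem.Set.len seen = (seen.length : Int) := rfl
  rw [this, hlen, List.length_map, List.countP_eq_length_filter]
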